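-- pv_equiv track=rewrite | github.com/pluralsh/console | utils/compatibility/scrapers/karmada.py | extract_table_lines
-- ===== SOURCE A (Python) =====
-- def extract_table_lines(markdown: str) -> list[str]:
--     if "## Kubernetes compatibility" not in markdown:
--         return []
--
--     section = markdown.split("## Kubernetes compatibility", 1)[1]
--     lines: list[str] = []
--     for line in section.splitlines():
--         stripped = line.strip()
--         if stripped.startswith("|"):
--             lines.append(stripped)
--         elif lines:
--             break
--     return lines
-- ===== SOURCE B (Python) =====
-- from itertools import groupby
--
-- def extract_table_lines(markdown: str) -> list[str]:
--     if "## Kubernetes compatibility" not in markdown: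
--         return []
--     section = markdown.split("## Kubernetes compatibility", 1)[1]
--     stripped = [l.strip() for l in section.splitlines()]
--     for is_table, group in groupby(stripped, key=lambda s: s.startswith("|")):
--         if is_table:
--             return list(group)
--     return []
-- ===== Notes on version B (the rewrite author's own statement) =====
-- stated objective: alternative
-- what changed: Replaces A's stateful accumulate-or-break scan with a groupby pass: stripped lines are grouped into maximal runs keyed by starts-with-'|', and the first run with a true key is returned.
import Mathlib
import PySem

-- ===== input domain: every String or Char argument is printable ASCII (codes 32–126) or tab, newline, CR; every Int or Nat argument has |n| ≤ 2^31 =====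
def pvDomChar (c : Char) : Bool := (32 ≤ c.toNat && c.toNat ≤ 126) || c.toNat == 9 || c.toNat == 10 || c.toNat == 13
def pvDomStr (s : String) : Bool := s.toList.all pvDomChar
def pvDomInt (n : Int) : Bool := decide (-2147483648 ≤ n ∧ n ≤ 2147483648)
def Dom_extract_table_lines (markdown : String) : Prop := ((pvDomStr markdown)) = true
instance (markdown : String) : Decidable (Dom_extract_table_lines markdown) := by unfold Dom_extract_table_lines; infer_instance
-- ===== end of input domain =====

-- B replaces A's accumulate-or-break scan with an itertools.groupby pass (first run keyed true); same cost, alternative decomposition.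

-- ===== PORT A =====
-- A's for-loop with break: accumulate stripped lines starting with "|", break on the first
-- non-table line once the accumulator is nonempty.
def etlLoopA : List String → List String → List String
  | [], lines => lines
  | l :: rest, lines =>
    let stripped := PySem.Str.strip l
    if PySem.Str.startswith stripped "|" then etlLoopA rest (lines ++ [stripped])
    else if lines ≠ [] then lines
    else etlLoopA rest lines

def extract_table_lines (markdown : String) : List String :=
  if PySem.Str.isIn "## Kubernetes compatibility" markdown = false then []
  else
    match PySem.Str.splitMax? markdown "## Kubernetes compatibility" 1 with
    | none => []  -- unreachable: separator is nonempty
    | some parts =>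
      -- parts[1]: the heading occurs, so the split has ≥ 2 parts and the index never raises
      let sec := (PySem.List.pyGet? parts 1).getD ""
      etlLoopA (PySem.Str.splitlines sec) []

-- ===== PORT B =====
-- itertools.groupby: maximal runs of equal key, in order, as (key, run) pairs.
def etlGroupby (p : String → Bool) : List String → List (Bool × List String)
  | [] => []
  | l :: rest =>
    let k := p l
    let same := rest.takeWhile (fun s => p s == k)
    let rest' := rest.dropWhile (fun s => p s == k)
    (k, l :: same) :: etlGroupby p rest'
termination_by ls => ls.length
decreasing_by
  exact Nat.lt_succ_of_le (List.length_dropWhile_le _ _)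

-- B's for-loop over the groups: return the first group whose key is true.
def etlFirstTrue : List (Bool × List String) → List String
  | [] => []
  | (k, g) :: rest => if k then g else etlFirstTrue rest

def extract_table_lines_alt (markdown : String) : List String :=
  if PySem.Str.isIn "## Kubernetes compatibility" markdown = false then []
  else
    match PySem.Str.splitMax? markdown "## Kubernetes compatibility" 1 with
    | none => []  -- unreachable: separator is nonempty
    | some parts =>
      let sec := (PySem.List.pyGet? parts 1).getD ""
      let stripped := (PySem.Str.splitlines sec).map PySem.Str.strip
      etlFirstTrue (etlGroupby (fun s => PySem.Str.startswith s "|") stripped)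

-- ===== PRECONDITION & SPEC =====
def Spec_extract_table_lines (markdown : String) (out : List String) : Prop := out = extract_table_lines_alt markdown
instance (markdown : String) (out : List String) : Decidable (Spec_extract_table_lines markdown out) := by unfold Spec_extract_table_lines; infer_instance

-- ===== CLAIM =====
def Claim_equal_extract_table_lines : Prop := ∀ (markdown : String), Dom_extract_table_lines markdown → Spec_extract_table_lines markdown (extract_table_lines markdown)

-- ===== LEMMAS AND PROOFS =====

theorem dropWhile_dropWhile {α : Type} (p : α → Bool) (l : List α) :
    (l.dropWhile p).dropWhile p = l.dropWhile p := by
  induction l with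
  | nil => rfl
  | cons a t ih =>
    by_cases h : p a = true
    · simpa [List.dropWhile_cons, h] using ih
    · simp [h]

-- the first true-keyed groupby run is exactly dropWhile-not-p then takeWhile-p
theorem firstTrue_groupby (p : String → Bool) (ls : List String) :
    etlFirstTrue (etlGroupby p ls) = (ls.dropWhile (fun s => !p s)).takeWhile p := by
  fun_induction etlGroupby p ls with
  | case1 => simp [etlFirstTrue]
  | case2 l rest k same rest' ih =>
    simp only [etlFirstTrue]
    by_cases h : p l = true
    · simp [k, same, h, beq_true]
    · have hl : p l = false := by simpa using h
      simp only [k, hl, Bool.false_eq_true, if_false]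
      rw [ih]
      have hpred : (fun s => p s == false) = (fun s => !p s) := by
        funext s; cases p s <;> rfl
      have hr : rest' = rest.dropWhile (fun s => !p s) := by
        simp only [rest', k, hl, hpred]
      rw [hr, dropWhile_dropWhile]
      simp [hl]

theorem etlLoopA_nonempty (ls : List String) (acc : List String) (hacc : acc ≠ []) :
    etlLoopA ls acc =
      acc ++ (ls.map PySem.Str.strip).takeWhile (fun s => PySem.Str.startswith s "|") := by
  induction ls generalizing acc with
  | nil => simp [etlLoopA]
  | cons l rest ih =>
    simp only [etlLoopA, List.map_cons, List.takeWhile_cons]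
    by_cases h : PySem.Chars.startswith (PySem.Chars.strip l.toList) ['|'] = true
    · simp [h, ih (acc ++ [PySem.Str.strip l]) (by simp)]
    · simp [h, hacc]

theorem etlLoopA_nil (ls : List String) :
    etlLoopA ls [] =
      ((ls.map PySem.Str.strip).dropWhile (fun s => !PySem.Str.startswith s "|")).takeWhile
        (fun s => PySem.Str.startswith s "|") := by
  induction ls with
  | nil => simp [etlLoopA]
  | cons l rest ih =>
    simp only [etlLoopA, List.map_cons, List.dropWhile_cons]
    by_cases h : PySem.Chars.startswith (PySem.Chars.strip l.toList) ['|'] = true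
    · simp [h, etlLoopA_nonempty rest [PySem.Str.strip l] (by simp)]
    · simp [h, ih]

-- ===== VERDICT =====
theorem extract_table_lines_spec : Claim_equal_extract_table_lines := by
  intro markdown _
  unfold Spec_extract_table_lines extract_table_lines extract_table_lines_alt
  split
  · rfl
  · cases PySem.Str.splitMax? markdown "## Kubernetes compatibility" 1 with
    | none => rfl
    | some parts =>
      simp only []
      rw [etlLoopA_nil, firstTrue_groupby]
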